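-- pv_equiv track=rewrite | github.com/abingham/knowit-julekalendar-2015 | p10.py | calc_after
-- ===== SOURCE A (Python) =====
-- def calc_after(prices):
--     after = [prices[-1] - prices[-2]]
--
--     for buy_day in reversed(range(0, len(prices) - 1)):
--         buy_price = prices[buy_day]
--         max_on_sell_day = max(prices[sell_day] - buy_price
--                               for sell_day in range(buy_day + 1, len(prices)))
--         if after[-1] < max_on_sell_day:
--             after.append(max_on_sell_day)
--         else:
--             after.append(after[-1])
--         assert after [-1] >= after[-2]
--
--     after.reverse()
--     return after
-- ===== SOURCE B (Python) =====
-- def calc_after(prices):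
--     # O(n): maintain the running maximum of future prices instead of rescanning.
--     best = prices[-1] - prices[-2]
--     out = [best]
--     smax = prices[-1]
--     for i in reversed(range(len(prices) - 1)):
--         best = max(best, smax - prices[i])
--         out.append(best)
--         smax = max(smax, prices[i])
--     out.reverse()
--     return out
-- ===== Notes on version B (the rewrite author's own statement) =====
-- stated objective: faster
-- what changed: Replaced the inner max-over-all-future-sell-days scan by a single running suffix maximum of prices carried through one backward pass.
import Mathlib
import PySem

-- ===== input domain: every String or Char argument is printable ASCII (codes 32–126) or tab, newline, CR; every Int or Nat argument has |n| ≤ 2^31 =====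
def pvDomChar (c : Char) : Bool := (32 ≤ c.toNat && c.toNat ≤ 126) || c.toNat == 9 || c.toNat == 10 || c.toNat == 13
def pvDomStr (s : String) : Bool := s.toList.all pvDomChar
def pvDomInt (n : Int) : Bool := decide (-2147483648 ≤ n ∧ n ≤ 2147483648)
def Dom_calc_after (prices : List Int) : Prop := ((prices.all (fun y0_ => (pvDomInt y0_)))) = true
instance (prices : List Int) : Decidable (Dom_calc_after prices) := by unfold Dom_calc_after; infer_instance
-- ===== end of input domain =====

-- B replaces A's quadratic inner rescans by one backward pass with a running suffix maximum (objective: faster).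

-- ===== PORT A =====
def calc_after (prices : List Int) : List Int :=
  let n : Int := prices.length
  let after0 : List Int := [PySem.List.pyGetD prices (-1) 0 - PySem.List.pyGetD prices (-2) 0]
  let after := ((PySem.List.pyRange 0 (n - 1) 1).reverse).foldl
    (fun after buy_day =>
      let buy_price := PySem.List.pyGetD prices buy_day 0
      let max_on_sell_day := (PySem.List.max?
          ((PySem.List.pyRange (buy_day + 1) n 1).map
            (fun sell_day => PySem.List.pyGetD prices sell_day 0 - buy_price))
          (fun y => y)).getD 0
      if PySem.List.pyGetD after (-1) 0 < max_on_sell_day then after ++ [max_on_sell_day]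
      else after ++ [PySem.List.pyGetD after (-1) 0])
    after0
  after.reverse

-- ===== PORT B =====
def calc_after_alt (prices : List Int) : List Int :=
  let best0 : Int := PySem.List.pyGetD prices (-1) 0 - PySem.List.pyGetD prices (-2) 0
  let st := ((PySem.List.pyRange 0 ((prices.length : Int) - 1) 1).reverse).foldl
    (fun (st : Int × List Int × Int) i =>
      let best := max st.1 (st.2.2 - PySem.List.pyGetD prices i 0)
      (best, st.2.1 ++ [best], max st.2.2 (PySem.List.pyGetD prices i 0)))
    (best0, [best0], PySem.List.pyGetD prices (-1) 0)
  st.2.1.reverse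

-- ===== PRECONDITION & SPEC =====
-- A begins by reading the last two elements, so it raises IndexError on lists of fewer than two elements.
def Pre_calc_after (prices : List Int) : Prop := 2 ≤ prices.length
instance (prices : List Int) : Decidable (Pre_calc_after prices) := by unfold Pre_calc_after; infer_instance
def pvWitness_calc_after : List Int := [3, 1, 4, 1, 5]

def Spec_calc_after (prices : List Int) (out : List Int) : Prop := out = calc_after_alt prices
instance (prices : List Int) (out : List Int) : Decidable (Spec_calc_after prices out) := by unfold Spec_calc_after; infer_instance

-- ===== CLAIM (what is proved, stated in full; the proofs are below) =====
def Claim_equal_calc_after : Prop := ∀ (prices : List Int), Dom_calc_after prices → Pre_calc_after prices → Spec_calc_after prices (calc_after prices)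

-- ===== LEMMAS AND PROOFS =====

-- the step functions of the two folds, named for the proofs
def pvStepA (prices : List Int) (after : List Int) (buy_day : Int) : List Int :=
  let buy_price := PySem.List.pyGetD prices buy_day 0
  let max_on_sell_day := (PySem.List.max?
      ((PySem.List.pyRange (buy_day + 1) (prices.length : Int) 1).map
        (fun sell_day => PySem.List.pyGetD prices sell_day 0 - buy_price))
      (fun y => y)).getD 0
  if PySem.List.pyGetD after (-1) 0 < max_on_sell_day then after ++ [max_on_sell_day]
  else after ++ [PySem.List.pyGetD after (-1) 0]

def pvStepB (prices : List Int) (st : Int × List Int × Int) (i : Int) : Int × List Int × Int :=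
  let best := max st.1 (st.2.2 - PySem.List.pyGetD prices i 0)
  (best, st.2.1 ++ [best], max st.2.2 (PySem.List.pyGetD prices i 0))

-- suffix maximum of prices from position m (defined for m < length)
def pvSM (prices : List Int) (m : Nat) : Int :=
  (prices.drop (m + 1)).foldl max (prices.getD m 0)

lemma pv_foldl_max_comm (t : List Int) : ∀ a b : Int, t.foldl max (max a b) = max (t.foldl max a) b := by
  induction t with
  | nil => intro a b; simp
  | cons c t ih =>
    intro a b
    simp only [List.foldl_cons]
    rw [max_right_comm, ih]

lemma pv_foldl_max_sub (t : List Int) : ∀ a c : Int, (t.map (fun x => x - c)).foldl max (a - c) = t.foldl max a - c := by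
  induction t with
  | nil => intro a c; simp
  | cons b t ih =>
    intro a c
    simp only [List.map_cons, List.foldl_cons]
    rw [max_sub_sub_right, ih]

lemma pv_sm_step (prices : List Int) (m : Nat) (h : m + 1 < prices.length) :
    max (pvSM prices (m + 1)) (prices.getD m 0) = pvSM prices m := by
  unfold pvSM
  rw [List.getD_eq_getElem _ _ h, List.drop_eq_getElem_cons h, List.foldl_cons,
    ← pv_foldl_max_comm]
  congr 1
  exact max_comm _ _

-- A's inner scan computes the suffix maximum minus the buy price
lemma pv_inner_max (prices : List Int) (m : Nat) (h : m + 1 < prices.length) (c : Int) :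
    (PySem.List.max?
      ((PySem.List.pyRange ((m : Int) + 1) (prices.length : Int) 1).map
        (fun sell_day => PySem.List.pyGetD prices sell_day 0 - c))
      (fun y => y)).getD 0 = pvSM prices (m + 1) - c := by
  have hmap : (PySem.List.pyRange ((m : Int) + 1) (prices.length : Int) 1).map
      (fun sell_day => PySem.List.pyGetD prices sell_day 0 - c)
      = ((PySem.List.pyRange ((m : Int) + 1) (prices.length : Int) 1).map
          (fun sell_day => PySem.List.pyGetD prices sell_day 0)).map (fun x => x - c) := by
    rw [List.map_map]
    rfl
  have hcast : ((m : Int) + 1) = (((m + 1 : Nat) : Int)) := by push_cast; ring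
  rw [hmap, hcast, PySem.List.map_pyGetD_pyRange' prices 0 (by positivity)]
  simp only [Int.toNat_natCast]
  rw [List.drop_eq_getElem_cons h]
  simp only [List.map_cons]
  rw [PySem.List.max?_id_cons]
  simp only [Option.getD_some]
  rw [pv_foldl_max_sub]
  unfold pvSM
  rw [List.getD_eq_getElem _ _ h]

-- coupling invariant: the two folds build the same output list
lemma pv_couple (prices : List Int) (m : Nat) (hm : m + 1 ≤ prices.length) :
    ∀ (after : List Int) (best smax : Int),
      PySem.List.pyGetD after (-1) 0 = best →
      smax = pvSM prices m →
      ((PySem.List.pyRange 0 (m : Int) 1).reverse).foldl (pvStepA prices) after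
        = (((PySem.List.pyRange 0 (m : Int) 1).reverse).foldl (pvStepB prices) (best, after, smax)).2.1 := by
  induction m with
  | zero =>
    intro after best smax _ _
    rw [PySem.List.pyRange_one_eq_nil (by omega)]
    simp
  | succ m ih =>
    intro after best smax hlast hsm
    have hcast : ((m + 1 : Nat) : Int) = (m : Int) + 1 := by push_cast; ring
    rw [hcast, PySem.List.pyRange_one_succ_right (by positivity)]
    simp only [List.reverse_append, List.reverse_cons, List.reverse_nil, List.nil_append,
      List.cons_append, List.foldl_cons]
    have hmlt : m + 1 < prices.length := by omega
    have hget : PySem.List.pyGetD prices (m : Int) 0 = prices.getD m 0 := by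
      rw [PySem.List.pyGetD_natCast]
    -- the value both steps append
    have hv : pvStepA prices after (m : Int) = after ++ [max best (smax - prices.getD m 0)] := by
      unfold pvStepA
      simp only [hget]
      rw [pv_inner_max prices m hmlt]
      rw [hlast, hsm]
      rcases lt_or_ge best (pvSM prices (m+1) - prices.getD m 0) with hlt | hge
      · rw [if_pos hlt, max_eq_right (le_of_lt hlt)]
      · rw [if_neg (not_lt.mpr hge), max_eq_left hge]
    have hvB : pvStepB prices (best, after, smax) (m : Int)
        = (max best (smax - prices.getD m 0), after ++ [max best (smax - prices.getD m 0)],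
           max smax (prices.getD m 0)) := by
      unfold pvStepB
      simp [hget]
    rw [hv, hvB]
    exact ih (by omega) _ _ _
      (by rw [PySem.List.pyGetD_neg_one_append_singleton])
      (by rw [hsm, pv_sm_step prices m hmlt])

lemma pv_main (prices : List Int) (h : 2 ≤ prices.length) :
    calc_after prices = calc_after_alt prices := by
  unfold calc_after calc_after_alt
  simp only []
  congr 1
  have h1 : PySem.List.pyGetD prices (-1) 0 = prices.getD (prices.length - 1) 0 := by
    rw [PySem.List.pyGetD_neg_ofNat prices 1 0 (by omega) (by omega),
      List.getD_eq_getElem _ _ (by omega)]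
  have hsm : PySem.List.pyGetD prices (-1) 0 = pvSM prices (prices.length - 1) := by
    unfold pvSM
    have : prices.length - 1 + 1 = prices.length := by omega
    rw [this, List.drop_length, List.foldl_nil, h1]
  have hcast : ((prices.length : Int) - 1) = (((prices.length - 1 : Nat) : Int)) := by
    omega
  rw [hcast]
  refine pv_couple prices (prices.length - 1) (by omega) _ _ _ ?_ hsm
  rw [show ([PySem.List.pyGetD prices (-1) 0 - PySem.List.pyGetD prices (-2) 0] : List Int)
      = [] ++ [PySem.List.pyGetD prices (-1) 0 - PySem.List.pyGetD prices (-2) 0] from rfl,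
    PySem.List.pyGetD_neg_one_append_singleton]

-- ===== VERDICT (by name: the statement is the Claim_ definition above) =====
theorem calc_after_spec : Claim_equal_calc_after := by
  intro prices _ hpre
  unfold Spec_calc_after
  exact pv_main prices hpre
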